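-- pv_equiv track=rewrite | github.com/nightqiuhua/bigCrawlers | wangban/wangban/wangban_utils/pic_hander.py | name_convertion
-- ===== SOURCE A (Python) =====
-- def name_convertion(input_name,url_to_img =True):
--     mark_list = [(':','@'),('/','$'),('.','&')]
--     if url_to_img:
--         for il_mark,le_mark in mark_list:
--             input_name = input_name.replace(il_mark,le_mark)
--     else:
--         for il_mark,le_mark in mark_list:
--             input_name = input_name.replace(le_mark,il_mark)
--     return input_name
-- ===== SOURCE B (Python) =====
-- def name_convertion(input_name, url_to_img=True):
--     forward = {':': '@', '/': '$', '.': '&'}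
--     mapping = forward if url_to_img else {v: k for k, v in forward.items()}
--     return ''.join(mapping.get(c, c) for c in input_name)
-- ===== Notes on version B (the rewrite author's own statement) =====
-- stated objective: idiomatic
-- what changed: Replaced three sequential full-string .replace passes with one character table chosen by the flag and a single join-pass over the input; correct because the source and target character sets are disjoint.
import Mathlib
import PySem

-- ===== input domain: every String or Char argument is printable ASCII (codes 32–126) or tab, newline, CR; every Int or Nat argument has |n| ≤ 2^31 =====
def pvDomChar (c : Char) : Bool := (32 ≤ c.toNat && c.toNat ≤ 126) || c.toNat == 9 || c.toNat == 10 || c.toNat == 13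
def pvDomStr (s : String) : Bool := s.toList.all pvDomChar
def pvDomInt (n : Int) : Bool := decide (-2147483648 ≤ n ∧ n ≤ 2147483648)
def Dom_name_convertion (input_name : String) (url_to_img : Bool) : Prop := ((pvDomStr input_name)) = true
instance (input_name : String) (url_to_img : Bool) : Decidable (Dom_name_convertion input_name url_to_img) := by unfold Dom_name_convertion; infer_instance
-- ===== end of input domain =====

-- B replaces A's three sequential full-string replace passes with one flag-chosen
-- character table and a single pass over the characters (idiomatic; same cost class).


-- ===== PORT A =====
-- A: loop over mark_list, replacing whole-string, direction chosen by the flag.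
def name_convertion (input_name : String) (url_to_img : Bool) : String :=
  let mark_list : List (String × String) := [(":", "@"), ("/", "$"), (".", "&")]
  if url_to_img then
    mark_list.foldl (fun acc p => PySem.Str.replace acc p.1 p.2) input_name
  else
    mark_list.foldl (fun acc p => PySem.Str.replace acc p.2 p.1) input_name

-- ===== PORT B =====
-- B: build one char→char table chosen by the flag, then a single pass joining
-- mapping.get(c, c) over the characters.
def name_convertion_alt (input_name : String) (url_to_img : Bool) : String :=
  let forward : PySem.Dict Char Char := PySem.Dict.ofList [(':', '@'), ('/', '$'), ('.', '&')]
  let mapping : PySem.Dict Char Char :=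
    if url_to_img then forward
    else (PySem.Dict.items forward).foldl (fun d p => PySem.Dict.insert d p.2 p.1) PySem.Dict.empty
  String.ofList (input_name.toList.map (fun c => PySem.Dict.getD mapping c c))

-- ===== PRECONDITION & SPEC =====
def Spec_name_convertion (input_name : String) (url_to_img : Bool) (out : String) : Prop := out = name_convertion_alt input_name url_to_img
instance (input_name : String) (url_to_img : Bool) (out : String) : Decidable (Spec_name_convertion input_name url_to_img out) := by unfold Spec_name_convertion; infer_instance

-- ===== CLAIM (what is proved, stated in full; the proofs are below) =====
def Claim_equal_name_convertion : Prop := ∀ (input_name : String) (url_to_img : Bool), Dom_name_convertion input_name url_to_img → Spec_name_convertion input_name url_to_img (name_convertion input_name url_to_img)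

-- ===== LEMMAS AND PROOFS =====

-- replace with a single-char pattern is a character map
theorem replace_go_single (a b : Char) :
    ∀ (fuel : Nat) (l acc : List Char), l.length ≤ fuel →
      PySem.Chars.replace.go [a] [b] fuel l acc
        = acc.reverse ++ l.map (fun c => if c = a then b else c) := by
  intro fuel
  induction fuel with
  | zero =>
    intro l acc h
    have : l = [] := by cases l <;> simp_all
    subst this; simp [PySem.Chars.replace.go]
  | succ n ih =>
    intro l acc h
    cases l with
    | nil => simp [PySem.Chars.replace.go]
    | cons c t =>
      by_cases hc : c = a
      · subst hc
        have hp : List.isPrefixOf [c] (c :: t) = true := by simp [List.isPrefixOf]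
        have h' : t.length ≤ n := by simpa using h
        simp only [PySem.Chars.replace.go, hp, if_pos]
        rw [show (List.drop [c].length (c :: t)) = t from rfl, ih t _ h']
        simp
      · have hp : List.isPrefixOf [a] (c :: t) = false := by
          simp [List.isPrefixOf]; exact fun h' => (hc h'.symm).elim
        have h' : t.length ≤ n := by simpa using h
        simp only [PySem.Chars.replace.go, hp]
        rw [ih t (c :: acc) h']
        simp [hc]

theorem replace_single (s : List Char) (a b : Char) :
    PySem.Chars.replace s [a] [b] = s.map (fun c => if c = a then b else c) := by
  simp [PySem.Chars.replace]
  exact replace_go_single a b s.length s [] (le_refl _)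

-- evaluating B's two concrete tables pointwise
theorem bwd_fold_eval :
    ((PySem.Dict.ofList [(':', '@'), ('/', '$'), ('.', '&')] : PySem.Dict Char Char).items).foldl
        (fun d p => PySem.Dict.insert d p.2 p.1) PySem.Dict.empty
      = ((PySem.Dict.empty.insert '@' ':').insert '$' '/').insert '&' '.' := by decide

theorem getD_bwd (c : Char) :
    (((PySem.Dict.empty.insert '@' ':').insert '$' '/').insert '&' '.' : PySem.Dict Char Char).getD c c
      = if c = '&' then '.' else if c = '$' then '/' else if c = '@' then ':' else c := by
  simp [PySem.Dict.getD_insert, PySem.Dict.getD_empty]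

theorem getD_fwd (c : Char) :
    (PySem.Dict.ofList [(':', '@'), ('/', '$'), ('.', '&')] : PySem.Dict Char Char).getD c c
      = if c = '.' then '&' else if c = '/' then '$' else if c = ':' then '@' else c := by
  rw [show (PySem.Dict.ofList [(':', '@'), ('/', '$'), ('.', '&')] : PySem.Dict Char Char)
      = ((PySem.Dict.empty.insert ':' '@').insert '/' '$').insert '.' '&' from by decide]
  simp [PySem.Dict.getD_insert, PySem.Dict.getD_empty]

-- ===== VERDICT (by name: the statement is the Claim_ definition above) =====
theorem name_convertion_spec : Claim_equal_name_convertion := by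
  intro s flag _
  unfold Spec_name_convertion name_convertion name_convertion_alt
  cases flag <;>
    simp only [List.foldl, PySem.Str.replace, String.toList_ofList, Bool.false_eq_true,
      if_true, if_false, List.foldl] <;>
  · rw [show (":" : String).toList = [':'] from rfl, show ("@" : String).toList = ['@'] from rfl,
      show ("/" : String).toList = ['/'] from rfl, show ("$" : String).toList = ['$'] from rfl,
      show ("." : String).toList = ['.'] from rfl, show ("&" : String).toList = ['&'] from rfl]
    rw [replace_single, replace_single, replace_single]
    simp only [List.map_map]
    congr 1
    apply List.map_congr_left
    intro c _
    simp only [Function.comp]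
    first
      | rw [bwd_fold_eval, getD_bwd]
      | rw [getD_fwd]
    split_ifs <;> simp_all
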